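-- pv_equiv track=rewrite | github.com/MaQinglin-665/AI-chat | tts.py | _detect_text_lang
-- ===== SOURCE A (Python) =====
-- def _detect_text_lang(text):
--     """Detect text language. Use 'auto' for any Chinese+English mix."""
--     s = str(text or "").strip()
--     if not s:
--         return "zh"
--     cn_chars = sum(1 for c in s if "\u4e00" <= c <= "\u9fff")
--     en_chars = sum(1 for c in s if c.isascii() and c.isalpha())
--     if cn_chars == 0 and en_chars > 0:
--         return "en"
--     if cn_chars > 0 and en_chars > 0:
--         return "auto"
--     return "zh"
-- ===== SOURCE B (Python) =====
-- def _detect_text_lang(text):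
--     """Detect text language. Use 'auto' for any Chinese+English mix."""
--     s = str(text or "").strip()
--     if not s:
--         return "zh"
--     has_cn = False
--     has_en = False
--     for c in s:
--         if "\u4e00" <= c <= "\u9fff":
--             has_cn = True
--         elif c.isascii() and c.isalpha():
--             has_en = True
--         if has_cn and has_en:
--             return "auto"
--     return "en" if has_en and not has_cn else "zh"
-- ===== Notes on version B (the rewrite author's own statement) =====
-- stated objective: alternative
-- what changed: Replaces A's two full counting passes (two sum-over-generator scans) with a single pass maintaining two booleans and an early exit as soon as both scripts have been seen.
import Mathlib
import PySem

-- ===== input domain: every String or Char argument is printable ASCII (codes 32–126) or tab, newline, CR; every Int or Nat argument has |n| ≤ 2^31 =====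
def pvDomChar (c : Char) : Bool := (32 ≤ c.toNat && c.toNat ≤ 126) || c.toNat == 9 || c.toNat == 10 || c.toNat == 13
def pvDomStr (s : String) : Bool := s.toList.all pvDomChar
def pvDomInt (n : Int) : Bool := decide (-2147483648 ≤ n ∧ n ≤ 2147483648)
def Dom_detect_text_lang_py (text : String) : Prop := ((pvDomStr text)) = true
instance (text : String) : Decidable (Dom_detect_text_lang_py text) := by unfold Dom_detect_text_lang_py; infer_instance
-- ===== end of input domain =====

-- B replaces A's two counting passes with a single boolean-flag pass that exits early on a mixed string (alternative decomposition, same cost).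


-- ===== PORT A =====
-- shared character predicates ('\u4e00' <= c <= '\u9fff'; c.isascii() and c.isalpha())
def pvIsCn (c : Char) : Bool := 0x4e00 ≤ c.toNat && c.toNat ≤ 0x9fff
def pvIsEn (c : Char) : Bool := c.toNat < 128 && PySem.Chars.isalpha c

def detect_text_lang_py (text : String) : String :=
  let s := PySem.Str.strip text
  if s = "" then "zh"
  else
    let cn_chars := s.toList.countP pvIsCn
    let en_chars := s.toList.countP pvIsEn
    if cn_chars = 0 ∧ en_chars > 0 then "en"
    else if cn_chars > 0 ∧ en_chars > 0 then "auto"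
    else "zh"

-- ===== PORT B =====
-- the single-pass loop of Source B: two flags, early return "auto"
def pvLoopB : List Char → Bool → Bool → String
  | [], has_cn, has_en => if has_en && !has_cn then "en" else "zh"
  | c :: rest, has_cn, has_en =>
    let has_cn := has_cn || pvIsCn c
    let has_en := if pvIsCn c then has_en else has_en || pvIsEn c
    if has_cn && has_en then "auto" else pvLoopB rest has_cn has_en

def detect_text_lang_py_alt (text : String) : String :=
  let s := PySem.Str.strip text
  if s = "" then "zh"
  else pvLoopB s.toList false false

-- ===== PRECONDITION & SPEC =====
def Spec_detect_text_lang_py (text : String) (out : String) : Prop := out = detect_text_lang_py_alt text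
instance (text : String) (out : String) : Decidable (Spec_detect_text_lang_py text out) := by unfold Spec_detect_text_lang_py; infer_instance

-- ===== CLAIM (what is proved, stated in full; the proofs are below) =====
def Claim_equal_detect_text_lang_py : Prop := ∀ (text : String), Dom_detect_text_lang_py text → Spec_detect_text_lang_py text (detect_text_lang_py text)

-- ===== LEMMAS AND PROOFS =====

-- a Chinese char is never an ASCII letter
theorem pvIsCn_not_isEn (c : Char) (h : pvIsCn c = true) : pvIsEn c = false := by
  simp [pvIsCn] at h
  simp [pvIsEn]
  omega

-- the loop computes the final branch on "any isCn / any isEn", threaded through the flags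
theorem pvLoopB_eq (cs : List Char) (bc be : Bool) (hne : (bc && be) = false) :
    pvLoopB cs bc be =
      (if (bc || cs.any pvIsCn) && (be || cs.any pvIsEn) then "auto"
       else if (be || cs.any pvIsEn) && !(bc || cs.any pvIsCn) then "en" else "zh") := by
  induction cs generalizing bc be with
  | nil => cases bc <;> cases be <;> simp_all [pvLoopB]
  | cons c rest ih =>
    by_cases hc : pvIsCn c = true
    · have he := pvIsCn_not_isEn c hc
      cases bc <;> cases be <;>
        simp_all [pvLoopB, List.any_cons]
    · simp only [Bool.not_eq_true] at hc
      cases bc <;> cases be <;> cases h : pvIsEn c <;>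
        simp_all [pvLoopB, List.any_cons]

theorem countP_pos_iff_any (p : Char → Bool) (cs : List Char) :
    0 < cs.countP p ↔ cs.any p = true := by
  rw [Nat.pos_iff_ne_zero, Ne, List.countP_eq_zero]
  simp [List.any_eq_true]

-- ===== VERDICT (by name: the statement is the Claim_ definition above) =====
theorem detect_text_lang_py_spec : Claim_equal_detect_text_lang_py := by
  intro text _
  unfold Spec_detect_text_lang_py detect_text_lang_py detect_text_lang_py_alt
  set s := PySem.Str.strip text with hs
  by_cases h : s = ""
  · simp [h]
  · rw [if_neg h, if_neg h, pvLoopB_eq _ _ _ rfl]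
    rcases hcn : s.toList.any pvIsCn <;> rcases hen : s.toList.any pvIsEn <;>
      simp_all [- countP_pos_iff_any, countP_pos_iff_any, Nat.pos_iff_ne_zero]
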